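-- pv_equiv track=rewrite | github.com/ALTA-DE4-DeanDwiMahendra/3.a.Basic-Programming-Part4 | problem2/main.py | draw_xyz
-- ===== SOURCE A (Python) =====
-- def draw_xyz(N):
--     result = ""
--     for i in range(1, N * N + 1):
--         if i % 3 == 0:
--             result += "X "
--         elif i % 2 == 0:
--             result += "Z "
--         else:
--             result += "Y "
--
--         if i % N == 0:
--             result += "\n"  # Pindah ke baris berikutnya setelah mencetak N elemen
--     return result
-- ===== SOURCE B (Python) =====
-- PAT = ['X', 'Y', 'Z', 'X', 'Z', 'Y']  # cell number i gets PAT[i % len(PAT)]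
--
-- def draw_xyz(N):
--     rows = []
--     for r in range(N):
--         row = ''.join(PAT[(r * N + c + 1) % 6] + ' ' for c in range(N))
--         rows.append(row + '\n')
--     return ''.join(rows)
-- ===== Notes on version B (the rewrite author's own statement) =====
-- stated objective: idiomatic
-- what changed: Replaces the arithmetic if/elif branching and the flat i%N newline test by a precomputed cyclic pattern table indexed by the cell index modulo the pattern length, inside an explicit row/column nested loop with per-row join; Pre_ excludes negative N, an out-of-domain grid size on which neither output is specified (A squares N and still draws an |N|x|N| grid, B draws nothing).
-- outside the precondition, e.g. on draw_xyz(-2): A returns 'Y Z \nX Z \n', B returns ''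
import Mathlib
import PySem

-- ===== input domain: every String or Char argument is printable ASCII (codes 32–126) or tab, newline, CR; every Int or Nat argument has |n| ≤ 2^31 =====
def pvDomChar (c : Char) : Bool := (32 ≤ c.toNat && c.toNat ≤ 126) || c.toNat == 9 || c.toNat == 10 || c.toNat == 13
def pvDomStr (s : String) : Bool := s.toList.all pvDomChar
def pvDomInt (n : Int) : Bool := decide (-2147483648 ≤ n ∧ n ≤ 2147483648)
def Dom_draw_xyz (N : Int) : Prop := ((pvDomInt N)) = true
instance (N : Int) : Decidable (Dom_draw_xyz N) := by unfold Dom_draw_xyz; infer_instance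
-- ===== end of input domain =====

-- B replaces A's if/elif arithmetic and flat modulo-newline pass by a fixed-length cyclic pattern
-- table looked up inside an explicit row/column nested loop (idiomatic; same cost).

-- ===== PORT A =====
def draw_xyz (N : Int) : String :=
  String.ofList <|
    (PySem.List.pyRange 1 (N * N + 1) 1).foldl
      (fun result i =>
        let result :=
          if PySem.Int.mod i 3 = 0 then result ++ ['X', ' ']
          else if PySem.Int.mod i 2 = 0 then result ++ ['Z', ' ']
          else result ++ ['Y', ' ']
        if PySem.Int.mod i N = 0 then result ++ ['\n'] else result) []

-- ===== PORT B =====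
def PAT : List (List Char) := [['X'], ['Y'], ['Z'], ['X'], ['Z'], ['Y']]

def draw_xyz_alt (N : Int) : String :=
  let M := N.toNat   -- range(N) iterates max(N,0) times
  String.ofList
    (((List.range M).map (fun r =>
        ((List.range M).map (fun c => PAT.getD ((r * M + c + 1) % 6) [] ++ [' '])).flatten
          ++ ['\n'])).flatten)

-- ===== PRECONDITION & SPEC =====
-- Pre_ excludes negative N, an out-of-domain grid size on which no one would specify either output:
-- A squares N and still draws an |N|×|N| grid there, B draws nothing.
def Pre_draw_xyz (N : Int) : Prop := 0 ≤ N
instance (N : Int) : Decidable (Pre_draw_xyz N) := by unfold Pre_draw_xyz; infer_instance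
def pvWitness_draw_xyz : Int := 3

def Spec_draw_xyz (N : Int) (out : String) : Prop := out = draw_xyz_alt N
instance (N : Int) (out : String) : Decidable (Spec_draw_xyz N out) := by unfold Spec_draw_xyz; infer_instance

-- ===== CLAIM (what is proved, stated in full; the proofs are below) =====
def Claim_equal_draw_xyz : Prop := ∀ (N : Int), Dom_draw_xyz N → Pre_draw_xyz N → Spec_draw_xyz N (draw_xyz N)

-- ===== LEMMAS AND PROOFS =====

-- A's loop body as a pure function of the index
def gA (N i : Int) : List Char :=
  (if PySem.Int.mod i 3 = 0 then ['X', ' ']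
   else if PySem.Int.mod i 2 = 0 then ['Z', ' ']
   else ['Y', ' ']) ++ (if PySem.Int.mod i N = 0 then ['\n'] else [])

-- B's cell and row, as functions
def cellB (M r c : Nat) : List Char := PAT.getD ((r * M + c + 1) % 6) [] ++ [' ']

def rowB (M r : Nat) : List Char := ((List.range M).map (cellB M r)).flatten ++ ['\n']

lemma foldA_eq (N : Int) (l : List Int) (acc : List Char) :
    l.foldl
      (fun result i =>
        let result :=
          if PySem.Int.mod i 3 = 0 then result ++ ['X', ' ']
          else if PySem.Int.mod i 2 = 0 then result ++ ['Z', ' ']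
          else result ++ ['Y', ' ']
        if PySem.Int.mod i N = 0 then result ++ ['\n'] else result) acc
      = acc ++ l.flatMap (gA N) := by
  have hfn : (fun (result : List Char) (i : Int) =>
        let result :=
          if PySem.Int.mod i 3 = 0 then result ++ ['X', ' ']
          else if PySem.Int.mod i 2 = 0 then result ++ ['Z', ' ']
          else result ++ ['Y', ' ']
        if PySem.Int.mod i N = 0 then result ++ ['\n'] else result)
      = fun result i => result ++ gA N i := by
    funext result i
    simp only [gA]
    split_ifs <;> simp
  rw [hfn, PySem.List.foldl_append_eq_flatMap]

-- the per-cell symbol: A's if/elif rules equal B's period-6 table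
lemma cell_eq (x : Nat) :
    (if PySem.Int.mod (x : Int) 3 = 0 then ['X', ' ']
     else if PySem.Int.mod (x : Int) 2 = 0 then ['Z', ' ']
     else ['Y', ' ']) = PAT.getD (x % 6) [] ++ [' '] := by
  have h3 : PySem.Int.mod (x : Int) 3 = ((x % 3 : Nat) : Int) := by
    exact_mod_cast PySem.Int.mod_natCast x 3
  have h2 : PySem.Int.mod (x : Int) 2 = ((x % 2 : Nat) : Int) := by
    exact_mod_cast PySem.Int.mod_natCast x 2
  rw [h3, h2]
  have e3 : x % 3 = x % 6 % 3 := (Nat.mod_mod_of_dvd x (by norm_num)).symm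
  have e2 : x % 2 = x % 6 % 2 := (Nat.mod_mod_of_dvd x (by norm_num)).symm
  rw [e3, e2]
  have h6 : x % 6 < 6 := Nat.mod_lt _ (by norm_num)
  interval_cases h : x % 6 <;> simp [PAT]

-- A's newline test, as a divisibility fact on the Nat index
lemma newline_iff (N : Int) (x : Nat) :
    PySem.Int.mod (x : Int) N = 0 ↔ N.natAbs ∣ x := by
  rw [PySem.Int.mod_eq_zero_iff_dvd]
  constructor
  · intro h; exact_mod_cast (Int.natAbs_dvd.mpr h)
  · intro h; exact Int.natAbs_dvd.mp (by exact_mod_cast h)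

-- one row, column by column
lemma col_lemma (N : Int) (M : Nat) (hM : N.natAbs = M) (r : Nat) :
    ∀ (e c : Nat), c + e = M →
      (PySem.List.pyRange (((r * M + c : Nat) : Int) + 1) (((r * M + M : Nat) : Int) + 1) 1).flatMap (gA N)
        = ((List.range' c e).map (cellB M r)).flatten ++ (if e = 0 then [] else ['\n']) := by
  intro e
  induction e with
  | zero =>
    intro c hc
    have hcM : c = M := by omega
    subst hcM
    rw [PySem.List.pyRange_one_eq_nil (by omega)]
    simp
  | succ e ih =>
    intro c hc
    have hlt : ((r * M + c : Nat) : Int) + 1 < ((r * M + M : Nat) : Int) + 1 := by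
      push_cast; omega
    rw [PySem.List.pyRange_one_cons hlt]
    have hidx : ((r * M + c : Nat) : Int) + 1 = ((r * M + c + 1 : Nat) : Int) := by push_cast; ring
    have hdvd : PySem.Int.mod (((r * M + c : Nat) : Int) + 1) N = 0 ↔ e = 0 := by
      rw [hidx, newline_iff N, hM]
      constructor
      · intro h
        have h' : M ∣ c + 1 := (Nat.dvd_add_right ⟨r, rfl⟩).mp (by
          have : r * M + c + 1 = M * r + (c + 1) := by ring
          rwa [this] at h)
        have hle : M ≤ c + 1 := Nat.le_of_dvd (by omega) h'
        omega
      · intro h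
        have hcM : c + 1 = M := by omega
        subst hcM
        exact ⟨r + 1, by ring⟩
    simp only [List.flatMap_cons]
    rw [hidx] at *
    have hcell := cell_eq (r * M + c + 1)
    by_cases he : e = 0
    · subst he
      have hcM : c + 1 = M := by omega
      have hnil : PySem.List.pyRange (((r * M + c + 1 : Nat) : Int) + 1) (((r * M + M : Nat) : Int) + 1) 1 = [] := by
        apply PySem.List.pyRange_one_eq_nil; push_cast; omega
      rw [hnil]
      simp only [List.flatMap_nil, List.append_nil]
      rw [gA, hcell, if_pos (hdvd.mpr rfl)]
      simp [cellB]
    · have hstep : ((r * M + c + 1 : Nat) : Int) + 1 = ((r * M + (c + 1) : Nat) : Int) + 1 := by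
        push_cast; ring
      rw [gA, hcell, if_neg (fun hcon => he (hdvd.mp hcon))]
      rw [hstep, ih (c + 1) (by omega)]
      rw [List.range'_succ]
      simp [cellB, he]

-- all rows
lemma row_lemma (N : Int) (M : Nat) (hM : N.natAbs = M) :
    ∀ (d r : Nat), r + d = M →
      (PySem.List.pyRange (((r * M : Nat) : Int) + 1) (((M * M : Nat) : Int) + 1) 1).flatMap (gA N)
        = ((List.range' r d).map (rowB M)).flatten := by
  intro d
  induction d with
  | zero =>
    intro r hr
    have : r = M := by omega
    subst this
    rw [PySem.List.pyRange_one_eq_nil (by omega)]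
    simp
  | succ d ih =>
    intro r hr
    have hrM : r < M := by omega
    have hsplit := PySem.List.pyRange_one_append (((r * M : Nat) : Int) + 1)
        (((r * M + M : Nat) : Int) + 1) (((M * M : Nat) : Int) + 1)
        (by
          have h1 : (r * M : Nat) ≤ r * M + M := Nat.le_add_right _ _
          exact_mod_cast Nat.add_le_add_right h1 1)
        (by
          have h2 : (r + 1) * M ≤ M * M := Nat.mul_le_mul_right M (by omega)
          have h2' : r * M + M ≤ M * M := by rw [Nat.succ_mul] at h2; exact h2
          exact_mod_cast Nat.add_le_add_right h2' 1)
    rw [hsplit, List.flatMap_append]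
    have hc0 : ((r * M : Nat) : Int) + 1 = ((r * M + 0 : Nat) : Int) + 1 := by norm_num
    rw [hc0, col_lemma N M hM r M 0 (by omega)]
    have hnext : ((r * M + M : Nat) : Int) + 1 = (((r + 1) * M : Nat) : Int) + 1 := by
      push_cast; ring
    rw [hnext, ih (r + 1) (by omega)]
    rw [List.range'_succ]
    have hMne : M ≠ 0 := by omega
    simp [rowB, hMne, List.range_eq_range']

-- ===== VERDICT (by name: the statement is the Claim_ definition above) =====
theorem draw_xyz_spec : Claim_equal_draw_xyz := by
  intro N _ hN
  have hN' : (0:Int) ≤ N := hN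
  unfold Spec_draw_xyz draw_xyz draw_xyz_alt
  set M := N.toNat with hM
  have hMA : N.natAbs = M := by omega
  rw [foldA_eq]
  have hrange : PySem.List.pyRange 1 (N * N + 1) 1
      = PySem.List.pyRange (((0 * M : Nat) : Int) + 1) (((M * M : Nat) : Int) + 1) 1 := by
    have hMN : (M : Int) = N := by omega
    have : N * N = ((M * M : Nat) : Int) := by
      push_cast; rw [hMN]
    rw [this]; norm_num
  rw [hrange, row_lemma N M hMA M 0 (by omega)]
  have hrow : rowB M = fun r =>
      ((List.range M).map (fun c => PAT.getD ((r * M + c + 1) % 6) [] ++ [' '])).flatten ++ ['\n'] := by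
    funext r
    simp only [rowB]
    congr 2
  rw [hrow]
  simp [List.range_eq_range']
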